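-- pv_equiv track=rewrite | github.com/autoppia/autoppia_operator | agent.py | _task_is_info_seeking
-- ===== SOURCE A (Python) =====
-- def _task_is_info_seeking(task: str) -> bool:
--     t = str(task or "").lower()
--     if not t:
--         return False
--     markers = {
--         "what",
--         "which",
--         "tell",
--         "list",
--         "summary",
--         "summarize",
--         "information",
--         "info",
--         "details",
--         "research",
--         "find",
--         "dime",
--         "que",
--         "qué",
--         "resume",
--         "resumen",
--         "productos",
--         "products",
--         "features",
--         "pricing",
--         "portfolio",
--         "value",
--     }
--     return any(m in t for m in markers)
-- ===== SOURCE B (Python) =====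
-- _MARKERS = (
--     "what", "which", "tell", "list", "summary", "summarize", "information",
--     "info", "details", "research", "find", "dime", "que", "qu\u00e9", "resume",
--     "resumen", "productos", "products", "features", "pricing", "portfolio", "value",
-- )
--
--
-- def _task_is_info_seeking(task: str) -> bool:
--     # Single left-to-right scan over the text: at each position, test whether
--     # any marker starts there (position-driven, like a literal-alternation
--     # automaton), instead of one full substring search per marker.
--     t = str(task or "").lower()
--     for i in range(len(t)):
--         for m in _MARKERS:
--             if t.startswith(m, i):
--                 return True
--     return False
-- ===== Notes on version B (the rewrite author's own statement) =====
-- stated objective: alternative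
-- what changed: Replaces A's marker-driven loop of k independent full substring-membership searches with one position-driven left-to-right scan of the text that at each position checks whether any marker starts there (prefix test), dropping the explicit empty-string guard which the scan makes redundant.
import Mathlib
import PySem

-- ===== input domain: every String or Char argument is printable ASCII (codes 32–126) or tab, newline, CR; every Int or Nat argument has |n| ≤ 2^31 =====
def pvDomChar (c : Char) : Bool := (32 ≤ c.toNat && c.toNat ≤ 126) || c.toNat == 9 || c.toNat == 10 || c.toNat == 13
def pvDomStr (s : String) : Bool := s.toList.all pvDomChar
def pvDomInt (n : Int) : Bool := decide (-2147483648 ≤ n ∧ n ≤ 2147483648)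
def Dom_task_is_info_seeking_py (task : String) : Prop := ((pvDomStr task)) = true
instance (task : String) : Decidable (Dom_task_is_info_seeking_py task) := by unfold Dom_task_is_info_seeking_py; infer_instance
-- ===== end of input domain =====

-- B replaces A's per-marker full substring searches with one position-driven scan
-- that checks at each position whether any marker starts there (alternative, same cost class).


-- ===== PORT A =====
-- Python's `markers` is a set literal only iterated by `any` of booleans, so the
-- iteration order is irrelevant; it is ported as the list of its distinct elements.
def pvMarkersA : List String :=
  ["what", "which", "tell", "list", "summary", "summarize", "information",
   "info", "details", "research", "find", "dime", "que", "qué", "resume",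
   "resumen", "productos", "products", "features", "pricing", "portfolio", "value"]

def task_is_info_seeking_py (task : String) : Bool :=
  let t := PySem.Str.lower task          -- t = str(task or "").lower(); task is a str, so `task or ""` is task unless empty
  if t.toList.isEmpty then false         -- if not t: return False
  else pvMarkersA.any (fun m => PySem.Str.isIn m t)   -- any(m in t for m in markers)

-- ===== PORT B =====
def pvMarkersB : List (List Char) :=
  ["what".toList, "which".toList, "tell".toList, "list".toList, "summary".toList,
   "summarize".toList, "information".toList, "info".toList, "details".toList,
   "research".toList, "find".toList, "dime".toList, "que".toList, "qué".toList,
   "resume".toList, "resumen".toList, "productos".toList, "products".toList,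
   "features".toList, "pricing".toList, "portfolio".toList, "value".toList]

-- the `for i in range(len(t))` loop of Source B: each recursive step is one position i
-- (the suffix t[i:]); `t.startswith(m, i)` is the prefix test on that suffix.
def pvScan (ms : List (List Char)) : List Char → Bool
  | [] => false
  | c :: rest => if ms.any (fun m => m.isPrefixOf (c :: rest)) then true else pvScan ms rest

def task_is_info_seeking_py_alt (task : String) : Bool :=
  pvScan pvMarkersB (PySem.Str.lower task).toList

-- ===== PRECONDITION & SPEC =====
def Spec_task_is_info_seeking_py (task : String) (out : Bool) : Prop := out = task_is_info_seeking_py_alt task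
instance (task : String) (out : Bool) : Decidable (Spec_task_is_info_seeking_py task out) := by unfold Spec_task_is_info_seeking_py; infer_instance

-- ===== CLAIM (what is proved, stated in full; the proofs are below) =====
def Claim_equal_task_is_info_seeking_py : Prop := ∀ (task : String), Dom_task_is_info_seeking_py task → Spec_task_is_info_seeking_py task (task_is_info_seeking_py task)

-- ===== LEMMAS AND PROOFS =====

-- B's scan finds exactly the strings that contain some marker as an infix
-- (markers are nonempty, so nothing is found in the empty string).
lemma pvScan_iff (ms : List (List Char)) (h : ∀ m ∈ ms, m ≠ []) (cs : List Char) :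
    pvScan ms cs = true ↔ ∃ m ∈ ms, m <:+: cs := by
  induction cs with
  | nil =>
      simp only [pvScan, Bool.false_eq_true, false_iff, not_exists]
      rintro m ⟨hm, hinf⟩
      exact h m hm (List.eq_nil_of_infix_nil hinf)
  | cons c rest ih =>
      simp only [pvScan]
      by_cases hp : (ms.any fun m => m.isPrefixOf (c :: rest)) = true
      · rw [if_pos hp]
        simp only [true_iff]
        rcases List.any_eq_true.mp hp with ⟨m, hm, hpre⟩
        exact ⟨m, hm, List.infix_cons_iff.mpr (Or.inl (List.isPrefixOf_iff_prefix.mp hpre))⟩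
      · rw [if_neg hp, ih]
        constructor
        · rintro ⟨m, hm, hinf⟩
          exact ⟨m, hm, List.infix_cons_iff.mpr (Or.inr hinf)⟩
        · rintro ⟨m, hm, hinf⟩
          rcases List.infix_cons_iff.mp hinf with hpre | hinf'
          · refine absurd ?_ hp
            exact List.any_eq_true.mpr ⟨m, hm, List.isPrefixOf_iff_prefix.mpr hpre⟩
          · exact ⟨m, hm, hinf'⟩

-- ===== VERDICT (by name: the statement is the Claim_ definition above) =====

theorem task_is_info_seeking_py_spec : Claim_equal_task_is_info_seeking_py := by
  intro task _
  show task_is_info_seeking_py task = task_is_info_seeking_py_alt task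
  unfold task_is_info_seeking_py task_is_info_seeking_py_alt
  rw [Bool.eq_iff_iff]
  simp only [PySem.Str.isIn, PySem.Str.toList_lower]
  generalize PySem.Chars.lower task.toList = cs
  cases cs with
  | nil => simp [pvScan]
  | cons c rest =>
      rw [if_neg (by simp), List.any_eq_true, pvScan_iff pvMarkersB (by decide)]
      simp [pvMarkersA, pvMarkersB, PySem.Chars.isIn_iff_infix]
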